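-- pv_equiv track=rewrite | github.com/Nghia03092004/nghia03092004.github.io | project_euler/problem_963/solution.py | solve
-- ===== SOURCE A (Python) =====
-- from math import isqrt
-- from collections import Counter
--
-- def sieve(n):
--     s = bytearray(b'\x01') * (n + 1)
--     s[0] = s[1] = 0
--     for i in range(2, isqrt(n) + 1):
--         if s[i]:
--             s[i*i::i] = bytearray(len(s[i*i::i]))
--     return [i for i in range(2, n + 1) if s[i]]
--
-- def to_base(n, b):
--     """Convert n to list of digits in base b (least significant first)."""
--     if n == 0:
--         return [0]
--     digits = []
--     while n > 0:
--         digits.append(n % b)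
--         n //= b
--     return digits
--
-- def is_palindrome_base(n, b):
--     """Check if n is a palindrome in base b."""
--     digits = to_base(n, b)
--     return digits == digits[::-1]
--
-- def solve(N=10**6):
--     primes = sieve(N - 1)
--     count = 0
--     base_counts = Counter()
--     palindrome_counts = Counter()
--     for p in primes:
--         pal_bases = []
--         for b in range(2, 17):
--             if is_palindrome_base(p, b):
--                 pal_bases.append(b)
--                 base_counts[b] += 1
--         if len(pal_bases) >= 2:
--             count += 1
--             palindrome_counts[len(pal_bases)] += 1
--     return count, base_counts, palindrome_counts
-- ===== SOURCE B (Python) =====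
-- def _mirror(v, t, b):
--     """Append the base-b digits of t, most significant last, onto v."""
--     while t > 0:
--         v = v * b + t % b
--         t //= b
--     return v
--
-- def _palindromes(b, limit):
--     """All base-b palindromes in [1, limit], generated from their top halves."""
--     pals = set()
--     h = 1
--     while _mirror(h, h // b, b) <= limit:       # odd-digit-count palindrome from half h
--         pals.add(_mirror(h, h // b, b))
--         e = _mirror(h, h, b)                    # even-digit-count palindrome from half h
--         if e <= limit:
--             pals.add(e)
--         h += 1
--     return pals
--
-- def solve(N=10**6):
--     limit = N - 1
--     is_p = [True] * (limit + 1)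
--     is_p[0] = is_p[1] = False
--     i = 2
--     while i * i <= limit:
--         if is_p[i]:
--             for j in range(i * i, limit + 1, i):
--                 is_p[j] = False
--         i += 1
--     pals = {b: _palindromes(b, limit) for b in range(2, 17)}
--     count = 0
--     base_counts = {}
--     palindrome_counts = {}
--     for n in range(2, limit + 1):
--         if not is_p[n]:
--             continue
--         k = 0
--         for b in range(2, 17):
--             if n in pals[b]:
--                 k += 1
--                 base_counts[b] = base_counts.get(b, 0) + 1
--         if k >= 2:
--             count += 1
--             palindrome_counts[k] = palindrome_counts.get(k, 0) + 1
--     return count, base_counts, palindrome_counts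
-- ===== Notes on version B (the rewrite author's own statement) =====
-- stated objective: faster
-- what changed: B never tests a number for palindromicity: for each base 2..16 it GENERATES all base-b palindromes up to N-1 from their top halves (mirror construction, O(sqrt N) values per base) into a set, then the per-prime pass only does 15 set-membership lookups instead of A's 15 digit-list constructions and reversals per prime; the sieve is an explicit loop-marking sieve.
import Mathlib
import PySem

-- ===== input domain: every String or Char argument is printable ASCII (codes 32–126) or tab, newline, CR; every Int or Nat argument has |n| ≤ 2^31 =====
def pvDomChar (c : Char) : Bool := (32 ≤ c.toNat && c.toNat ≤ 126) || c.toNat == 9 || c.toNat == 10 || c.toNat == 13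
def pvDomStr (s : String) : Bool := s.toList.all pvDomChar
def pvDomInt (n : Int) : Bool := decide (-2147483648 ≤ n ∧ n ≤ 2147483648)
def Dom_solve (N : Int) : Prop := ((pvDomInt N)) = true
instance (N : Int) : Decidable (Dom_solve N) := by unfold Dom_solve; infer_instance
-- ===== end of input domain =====

-- B replaces A's per-prime digit-reversal palindrome tests by per-base GENERATION of all palindromes
-- up to N-1 (mirroring each half value) into sets that the per-prime pass only looks up
-- (measured constant-factor speed-up at the largest timed size).

-- ===== PORT A =====
-- s[i*i::i] = bytearray(len(s[i*i::i])): zero every index i*i, i*i+i, … (exact for step i ≥ 1, start ≥ 0)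
def sieveClear (s : List Int) (i : Int) : List Int :=
  (PySem.List.pyRange (i*i) (s.length : Int) i).foldl (fun t j => t.set j.toNat 0) s

-- sieve(n); math.isqrt(n) is Nat.sqrt n.toNat (exact for n ≥ 0)
def sieveA (n : Int) : List Int :=
  let s := List.replicate (n+1).toNat (1 : Int)
  let s := (s.set 0 0).set 1 0
  let s := (PySem.List.pyRange 2 ((Nat.sqrt n.toNat : Int) + 1) 1).foldl
      (fun t i => if PySem.List.pyGetD t i 0 ≠ 0 then sieveClear t i else t) s
  (PySem.List.pyRange 2 (n+1) 1).foldl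
      (fun acc i => if PySem.List.pyGetD s i 0 ≠ 0 then acc ++ [i] else acc) []

-- while n > 0: digits.append(n % b); n //= b   (fuel n.toNat bounds the loop: exact for b ≥ 2, the only calls made)
def toBaseGo : Nat → Int → Int → List Int → List Int
  | 0, _, _, acc => acc
  | fuel+1, n, b, acc =>
      if 0 < n then toBaseGo fuel (PySem.Int.floordiv n b) b (acc ++ [PySem.Int.mod n b]) else acc

def toBase (n b : Int) : List Int :=
  if n = 0 then [0] else toBaseGo n.toNat n b []

-- digits == digits[::-1]  (a full [::-1] slice is List.reverse, exact)
def isPalindromeBase (n b : Int) : Bool :=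
  let digits := toBase n b
  decide (digits = digits.reverse)

-- body of 'for b in range(2, 17)': state (pal_bases, base_counts)
def innerStepA (p : Int) (q : List Int × PySem.Dict Int Int) (b : Int) : List Int × PySem.Dict Int Int :=
  if isPalindromeBase p b then (q.1 ++ [b], q.2.modify b 0 (· + 1)) else q

-- body of 'for p in primes': state (count, base_counts, palindrome_counts)
def solveStepA (st : Int × PySem.Dict Int Int × PySem.Dict Int Int) (p : Int) :
    Int × PySem.Dict Int Int × PySem.Dict Int Int :=
  let inner := (PySem.List.pyRange 2 17 1).foldl (innerStepA p) ([], st.2.1)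
  if 2 ≤ inner.1.length then
    (st.1 + 1, inner.2, st.2.2.modify (inner.1.length : Int) 0 (· + 1))
  else (st.1, inner.2, st.2.2)

def solve (N : Int) : Int × (List (Int × Int)) × (List (Int × Int)) :=
  let primes := sieveA (N - 1)
  let res := primes.foldl solveStepA (0, PySem.Dict.empty, PySem.Dict.empty)
  (res.1, res.2.1.items, res.2.2.items)

-- ===== PORT B =====
-- _mirror: while t > 0: v = v*b + t % b; t //= b   (fuel t.toNat bounds the loop: exact for b ≥ 2, the only calls made)
def mirrorGo : Nat → Int → Int → Int → Int
  | 0, _, _, v => v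
  | fuel+1, t, b, v =>
      if 0 < t then mirrorGo fuel (PySem.Int.floordiv t b) b (v * b + PySem.Int.mod t b) else v

def mirror (v t b : Int) : Int := mirrorGo t.toNat t b v

-- _palindromes: while _mirror(h, h//b, b) <= limit: … h += 1
-- (the odd-digit palindrome grows at least as fast as h, so fuel limit.toNat + 1 bounds the loop)
def palGo : Nat → Int → Int → Int → PySem.Set Int → PySem.Set Int
  | 0, _, _, _, s => s
  | fuel+1, h, b, limit, s =>
      if mirror h (PySem.Int.floordiv h b) b ≤ limit then
        let s := s.add (mirror h (PySem.Int.floordiv h b) b)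
        let s := if mirror h h b ≤ limit then s.add (mirror h h b) else s
        palGo fuel (h+1) b limit s
      else s

def palindromes (b limit : Int) : PySem.Set Int :=
  palGo (limit.toNat + 1) 1 b limit PySem.Set.empty

-- for j in range(i*i, limit+1, i): is_p[j] = False
def markB (s : List Bool) (i limit : Int) : List Bool :=
  (PySem.List.pyRange (i*i) (limit+1) i).foldl (fun t j => t.set j.toNat false) s

-- while i*i <= limit: …; i += 1   (fuel limit.toNat bounds the loop: i stays ≤ limit while the test holds)
def sieveBGo : Nat → Int → Int → List Bool → List Bool
  | 0, _, _, s => s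
  | fuel+1, i, limit, s =>
      if i * i ≤ limit then
        sieveBGo fuel (i+1) limit (if PySem.List.pyGetD s i false then markB s i limit else s)
      else s

-- body of 'for b in range(2, 17)': state (k, base_counts); pals[b] is a plain lookup
-- (every b in 2..16 is a key of pals, so d[b] is getD with an arbitrary default)
def innerStepB (n : Int) (pals : PySem.Dict Int (PySem.Set Int)) (q : Int × PySem.Dict Int Int) (b : Int) :
    Int × PySem.Dict Int Int :=
  if PySem.Set.contains (pals.getD b PySem.Set.empty) n then
    (q.1 + 1, q.2.insert b (q.2.getD b 0 + 1))
  else q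

-- body of 'for n in range(2, limit+1)', with the 'continue' guard
def solveStepB (s : List Bool) (pals : PySem.Dict Int (PySem.Set Int))
    (st : Int × PySem.Dict Int Int × PySem.Dict Int Int) (n : Int) :
    Int × PySem.Dict Int Int × PySem.Dict Int Int :=
  if !(PySem.List.pyGetD s n false) then st
  else
    let inner := (PySem.List.pyRange 2 17 1).foldl (innerStepB n pals) (0, st.2.1)
    if 2 ≤ inner.1 then
      (st.1 + 1, inner.2, st.2.2.insert inner.1 (st.2.2.getD inner.1 0 + 1))
    else (st.1, inner.2, st.2.2)

def solve_alt (N : Int) : Int × (List (Int × Int)) × (List (Int × Int)) :=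
  let limit := N - 1
  let s := ((List.replicate (limit+1).toNat true).set 0 false).set 1 false
  let s := sieveBGo limit.toNat 2 limit s
  let pals := (PySem.List.pyRange 2 17 1).foldl
      (fun d b => d.insert b (palindromes b limit)) PySem.Dict.empty
  let res := (PySem.List.pyRange 2 (limit+1) 1).foldl (solveStepB s pals)
      (0, PySem.Dict.empty, PySem.Dict.empty)
  (res.1, res.2.1.items, res.2.2.items)

-- ===== PRECONDITION & SPEC =====
-- Pre_ excludes exactly N < 2, where Python A raises IndexError (sieve writes s[0] = s[1] = 0 into a
-- bytearray of length N, which needs N ≥ 2); B raises IndexError on the same inputs.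
def Pre_solve (N : Int) : Prop := 2 ≤ N
instance (N : Int) : Decidable (Pre_solve N) := by unfold Pre_solve; infer_instance
def pvWitness_solve : Int := 10

def Spec_solve (N : Int) (out : Int × (List (Int × Int)) × (List (Int × Int))) : Prop := out = solve_alt N
instance (N : Int) (out : Int × (List (Int × Int)) × (List (Int × Int))) : Decidable (Spec_solve N out) := by unfold Spec_solve; infer_instance

-- ===== CLAIM (what is proved, stated in full; the proofs are below) =====
def Claim_equal_solve : Prop := ∀ (N : Int), Dom_solve N → Pre_solve N → Spec_solve N (solve N)

-- ===== LEMMAS AND PROOFS =====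

-- the Bool view of A's 0/1 sieve cells
def truthy (x : Int) : Bool := decide (x ≠ 0)

-- A's sieve array right before the comprehension
def sInitA (n : Int) : List Int := ((List.replicate (n+1).toNat (1 : Int)).set 0 0).set 1 0
def sFoldA (n : Int) : List Int :=
  (PySem.List.pyRange 2 ((Nat.sqrt n.toNat : Int) + 1) 1).foldl
    (fun t i => if PySem.List.pyGetD t i 0 ≠ 0 then sieveClear t i else t) (sInitA n)

lemma sieveA_eq (n : Int) :
    sieveA n = (PySem.List.pyRange 2 (n+1) 1).filter
      (fun i => decide (PySem.List.pyGetD (sFoldA n) i 0 ≠ 0)) := by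
  unfold sieveA sFoldA sInitA
  rw [PySem.List.foldl_append_ite_eq_filter]
  simp

lemma len_foldl_set {α : Type} (l : List Int) (s : List α) (v : α) :
    (l.foldl (fun t j => t.set j.toNat v) s).length = s.length := by
  induction l generalizing s with
  | nil => rfl
  | cons j l ih => simp [List.foldl_cons, ih, List.length_set]

lemma sieveClear_len (s : List Int) (i : Int) : (sieveClear s i).length = s.length :=
  len_foldl_set _ _ _

lemma map_foldl_set (l : List Int) (s : List Int) :
    l.foldl (fun t j => t.set j.toNat false) (s.map truthy)
      = (l.foldl (fun t j => t.set j.toNat 0) s).map truthy := by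
  induction l generalizing s with
  | nil => rfl
  | cons j l ih =>
      simp only [List.foldl_cons]
      have hset : (List.map truthy s).set j.toNat false = List.map truthy (s.set j.toNat 0) := by
        rw [List.map_set]
        norm_num [truthy]
      rw [hset]
      exact ih (s.set j.toNat 0)

lemma markB_eq (s : List Int) (i limit : Int) (hlen : (s.length : Int) = limit + 1) :
    markB (s.map truthy) i limit = (sieveClear s i).map truthy := by
  unfold markB sieveClear
  rw [hlen]
  exact map_foldl_set _ s

lemma pyGetD_map_truthy (s : List Int) (i : Int) :
    PySem.List.pyGetD (s.map truthy) i false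
      = truthy (PySem.List.pyGetD s i 0) := by
  have h := PySem.List.pyGetD_map (f := truthy) (xs := s) (i := i) (d := 0)
  simpa using h

-- the B while-loop is A's fold over range(2, isqrt(limit)+1), through the Bool view
lemma sieveBGo_eq (limit : Int) :
    ∀ (fuel : Nat) (i : Int), 2 ≤ i →
    (Nat.sqrt limit.toNat : Int) + 1 ≤ i + fuel →
    ∀ (s : List Int), (s.length : Int) = limit + 1 →
    sieveBGo fuel i limit (s.map truthy)
      = ((PySem.List.pyRange i ((Nat.sqrt limit.toNat : Int) + 1) 1).foldl
          (fun t j => if PySem.List.pyGetD t j 0 ≠ 0 then sieveClear t j else t) s).map truthy := by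
  intro fuel
  induction fuel with
  | zero =>
      intro i _hi hfuel s _hlen
      rw [PySem.List.pyRange_one_eq_nil (by omega)]
      rfl
  | succ f ih =>
      intro i hi hfuel s hlen
      show (if i * i ≤ limit then
              sieveBGo f (i+1) limit
                (if PySem.List.pyGetD (s.map truthy) i false then markB (s.map truthy) i limit
                 else s.map truthy)
            else s.map truthy) = _
      by_cases h : i * i ≤ limit
      · have hlim : (0:Int) ≤ limit := by nlinarith
        have hiff : i < (Nat.sqrt limit.toNat : Int) + 1 := by
          have h1 : i.toNat * i.toNat ≤ limit.toNat := by
            have hii : ((i.toNat : Int)) = i := by omega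
            have hll : ((limit.toNat : Int)) = limit := by omega
            have h' := h
            rw [← hii, ← hll] at h'
            exact_mod_cast h'
          have h2 : i.toNat ≤ Nat.sqrt limit.toNat := Nat.le_sqrt.mpr h1
          omega
        rw [if_pos h, PySem.List.pyRange_one_cons hiff]
        simp only [List.foldl_cons]
        rw [pyGetD_map_truthy]
        by_cases hc : PySem.List.pyGetD s i 0 ≠ 0
        · rw [if_pos hc]
          have : truthy (PySem.List.pyGetD s i 0) = true := by simp [truthy, hc]
          rw [this, if_pos rfl, markB_eq s i limit hlen]
          exact ih (i+1) (by omega) (by omega) _ (by rw [sieveClear_len]; exact hlen)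
        · rw [if_neg hc]
          have : truthy (PySem.List.pyGetD s i 0) = false := by simpa [truthy] using hc
          rw [this]
          simp only [Bool.false_eq_true, if_false]
          exact ih (i+1) (by omega) (by omega) s hlen
      · have : (Nat.sqrt limit.toNat : Int) + 1 ≤ i := by
          by_contra hcon
          have h2 : i.toNat ≤ Nat.sqrt limit.toNat := by omega
          have h3 : i.toNat * i.toNat ≤ limit.toNat := Nat.le_sqrt.mp h2
          have h4 : ((i.toNat : Int)) = i := by omega
          by_cases hge : (0:Int) ≤ limit
          · have h5 : ((limit.toNat : Int)) = limit := by omega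
            have : i * i ≤ limit := by
              rw [← h4, ← h5]
              exact_mod_cast h3
            exact h this
          · have : limit.toNat = 0 := by omega
            nlinarith [mul_self_nonneg i]
        rw [if_neg h, PySem.List.pyRange_one_eq_nil (by omega)]
        rfl

-- length of sInitA
lemma sInitA_len (n : Int) (h : 1 ≤ n) : ((sInitA n).length : Int) = n + 1 := by
  unfold sInitA
  simp only [List.length_set, List.length_replicate]
  omega

-- B's fully sieved array is A's, through the Bool view
lemma sieveB_final (limit : Int) (h : 1 ≤ limit) :
    sieveBGo limit.toNat 2 limit (((List.replicate (limit+1).toNat true).set 0 false).set 1 false)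
      = (sFoldA limit).map truthy := by
  have hinit : ((List.replicate (limit+1).toNat true).set 0 false).set 1 false
      = (sInitA limit).map truthy := by
    simp [sInitA, List.map_set, List.map_replicate, truthy]
  have hsq := Nat.sqrt_le_self limit.toNat
  rw [hinit, sieveBGo_eq limit limit.toNat 2 (by omega) (by omega) _ (sInitA_len limit h)]
  rfl

-- ===== digit lemmas =====

lemma toBaseGo_eq (b : Int) (hb : 2 ≤ b) :
    ∀ (fuel : Nat) (n : Int), 0 ≤ n → n.toNat ≤ fuel → ∀ acc,
      toBaseGo fuel n b acc = acc ++ (Nat.digits b.toNat n.toNat).map (fun d : Nat => (d : Int)) := by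
  intro fuel
  induction fuel with
  | zero =>
      intro n hn hf acc
      have : n = 0 := by omega
      subst this
      simp [toBaseGo]
  | succ f ih =>
      intro n hn hf acc
      rw [toBaseGo]
      by_cases h : 0 < n
      · rw [if_pos h]
        have hbn : (0:Int) ≤ b := by omega
        have e1 : PySem.Int.mod n b = ((n.toNat % b.toNat : Nat) : Int) := by
          conv_lhs => rw [← Int.toNat_of_nonneg hn, ← Int.toNat_of_nonneg hbn]
          exact PySem.Int.mod_natCast _ _
        have e2 : PySem.Int.floordiv n b = ((n.toNat / b.toNat : Nat) : Int) := by
          conv_lhs => rw [← Int.toNat_of_nonneg hn, ← Int.toNat_of_nonneg hbn]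
          exact PySem.Int.floordiv_natCast _ _
        have hblt : 1 < b.toNat := by omega
        have hnpos : 0 < n.toNat := by omega
        have hlt : n.toNat / b.toNat < n.toNat := Nat.div_lt_self hnpos hblt
        rw [e1, e2,
          ih ((n.toNat / b.toNat : Nat) : Int) (by positivity)
            (by rw [Int.toNat_natCast]; omega)]
        rw [Int.toNat_natCast, Nat.digits_def' hblt hnpos]
        simp [List.map_cons, List.append_assoc]
      · rw [if_neg h]
        have : n = 0 := by omega
        subst this
        simp

lemma mirrorGo_eq (b : Int) (hb : 2 ≤ b) :
    ∀ (fuel : Nat) (x : Int), 0 ≤ x → x.toNat ≤ fuel → ∀ r,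
      mirrorGo fuel x b r
        = r * b ^ (Nat.digits b.toNat x.toNat).length
          + ((Nat.ofDigits b.toNat ((Nat.digits b.toNat x.toNat).reverse) : ℕ) : Int) := by
  intro fuel
  induction fuel with
  | zero =>
      intro x hx hf r
      have : x = 0 := by omega
      subst this
      simp [mirrorGo, Nat.ofDigits_nil]
  | succ f ih =>
      intro x hx hf r
      rw [mirrorGo]
      by_cases h : 0 < x
      · rw [if_pos h]
        have hbn : (0:Int) ≤ b := by omega
        have e1 : PySem.Int.mod x b = ((x.toNat % b.toNat : Nat) : Int) := by
          conv_lhs => rw [← Int.toNat_of_nonneg hx, ← Int.toNat_of_nonneg hbn]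
          exact PySem.Int.mod_natCast _ _
        have e2 : PySem.Int.floordiv x b = ((x.toNat / b.toNat : Nat) : Int) := by
          conv_lhs => rw [← Int.toNat_of_nonneg hx, ← Int.toNat_of_nonneg hbn]
          exact PySem.Int.floordiv_natCast _ _
        have hblt : 1 < b.toNat := by omega
        have hxpos : 0 < x.toNat := by omega
        have hlt : x.toNat / b.toNat < x.toNat := Nat.div_lt_self hxpos hblt
        rw [e1, e2,
          ih ((x.toNat / b.toNat : Nat) : Int) (by positivity)
            (by rw [Int.toNat_natCast]; omega)]
        rw [Int.toNat_natCast, Nat.digits_def' hblt hxpos]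
        rw [List.reverse_cons, Nat.ofDigits_append, Nat.ofDigits_singleton,
          List.length_reverse, List.length_cons]
        have hbcast : ((b.toNat : Int)) = b := Int.toNat_of_nonneg hbn
        push_cast [hbcast]
        ring
      · rw [if_neg h]
        have : x = 0 := by omega
        subst this
        simp [Nat.ofDigits_nil]

-- ===== palindrome-generation lemmas (Nat level) =====

-- the two mirrored values, as numbers: odd / even digit count palindromes with top half h
def oddN (B h : ℕ) : ℕ := Nat.ofDigits B ((Nat.digits B (h / B)).reverse ++ Nat.digits B h)
def evenN (B h : ℕ) : ℕ := Nat.ofDigits B ((Nat.digits B h).reverse ++ Nat.digits B h)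

lemma digits_mir (B h : ℕ) (hB : 1 < B) (hh : 1 ≤ h) (C : List ℕ) (hC : ∀ d ∈ C, d < B) :
    Nat.digits B (Nat.ofDigits B (C ++ Nat.digits B h)) = C ++ Nat.digits B h := by
  have hne : Nat.digits B h ≠ [] := Nat.digits_ne_nil_iff_ne_zero.mpr (by omega)
  apply Nat.digits_ofDigits B hB
  · intro d hd
    rcases List.mem_append.mp hd with h1 | h1
    · exact hC d h1
    · exact Nat.digits_lt_base hB h1
  · intro hne2
    rw [List.getLast_append_of_ne_nil hne2 hne]
    exact Nat.getLast_digit_ne_zero B (by omega)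

lemma digits_oddN (B h : ℕ) (hB : 1 < B) (hh : 1 ≤ h) :
    Nat.digits B (oddN B h) = (Nat.digits B (h / B)).reverse ++ Nat.digits B h :=
  digits_mir B h hB hh _ (fun _d hd => Nat.digits_lt_base hB (List.mem_reverse.mp hd))

lemma digits_evenN (B h : ℕ) (hB : 1 < B) (hh : 1 ≤ h) :
    Nat.digits B (evenN B h) = (Nat.digits B h).reverse ++ Nat.digits B h :=
  digits_mir B h hB hh _ (fun _d hd => Nat.digits_lt_base hB (List.mem_reverse.mp hd))

lemma oddN_pal (B h : ℕ) (hB : 1 < B) (hh : 1 ≤ h) :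
    (Nat.digits B (oddN B h)).reverse = Nat.digits B (oddN B h) := by
  have hD : Nat.digits B h = h % B :: Nat.digits B (h / B) := Nat.digits_def' hB (by omega)
  rw [digits_oddN B h hB hh, hD]
  generalize Nat.digits B (h / B) = C
  simp

lemma evenN_pal (B h : ℕ) (hB : 1 < B) (hh : 1 ≤ h) :
    (Nat.digits B (evenN B h)).reverse = Nat.digits B (evenN B h) := by
  rw [digits_evenN B h hB hh]
  simp

lemma oddN_split (B h : ℕ) :
    oddN B h = Nat.ofDigits B (Nat.digits B (h / B)).reverse
      + B ^ (Nat.digits B (h / B)).length * h := by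
  rw [oddN, Nat.ofDigits_append, Nat.ofDigits_digits, List.length_reverse]

lemma evenN_split (B h : ℕ) :
    evenN B h = Nat.ofDigits B (Nat.digits B h).reverse
      + B ^ (Nat.digits B h).length * h := by
  rw [evenN, Nat.ofDigits_append, Nat.ofDigits_digits, List.length_reverse]

lemma le_oddN (B h : ℕ) (hB : 1 < B) : h ≤ oddN B h := by
  rw [oddN_split]
  calc h ≤ B ^ (Nat.digits B (h / B)).length * h :=
        Nat.le_mul_of_pos_left h (by positivity)
    _ ≤ _ := Nat.le_add_left _ _

lemma rev_lt (B : ℕ) (hB : 1 < B) (x : ℕ) :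
    Nat.ofDigits B (Nat.digits B x).reverse < B ^ (Nat.digits B x).length := by
  have := Nat.ofDigits_lt_base_pow_length (b := B) (l := (Nat.digits B x).reverse) hB
    (fun _d hd => Nat.digits_lt_base hB (List.mem_reverse.mp hd))
  simpa using this

lemma len_digits_succ (B h : ℕ) (hB : 1 < B) (hh : 1 ≤ h) :
    (Nat.digits B h).length = (Nat.digits B (h / B)).length + 1 := by
  rw [Nat.digits_def' hB (by omega)]
  rfl

lemma oddN_le_evenN (B h : ℕ) (hB : 1 < B) (hh : 1 ≤ h) : oddN B h ≤ evenN B h := by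
  rw [oddN_split, evenN_split, len_digits_succ B h hB hh]
  have h1 := rev_lt B hB (h / B)
  have h2 : B ^ ((Nat.digits B (h / B)).length + 1) = B ^ (Nat.digits B (h / B)).length * B :=
    pow_succ B _
  rw [h2]
  set m := (Nat.digits B (h / B)).length
  set r1 := Nat.ofDigits B (Nat.digits B (h / B)).reverse with hr1
  set r2 := Nat.ofDigits B (Nat.digits B h).reverse with hr2
  have hB2 : 2 ≤ B := hB
  have key : B ^ m ≤ B ^ m * h := Nat.le_mul_of_pos_right _ (by omega)
  have key2 : B ^ m * 2 * h ≤ B ^ m * B * h :=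
    Nat.mul_le_mul_right _ (Nat.mul_le_mul_left _ hB2)
  calc r1 + B ^ m * h ≤ B ^ m * h + B ^ m * h := Nat.add_le_add_right (le_trans (Nat.le_of_lt h1) key) _
    _ = B ^ m * 2 * h := by ring
    _ ≤ B ^ m * B * h := key2
    _ ≤ r2 + B ^ m * B * h := Nat.le_add_left _ _

lemma len_div_mono (B : ℕ) (hB : 1 < B) {x y : ℕ} (hxy : x ≤ y) :
    (Nat.digits B x).length ≤ (Nat.digits B y).length := by
  rw [Nat.digits_length_le_iff hB]
  calc x ≤ y := hxy
    _ < B ^ (Nat.digits B y).length := Nat.lt_base_pow_length_digits hB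

lemma base_pow_le (B h : ℕ) (hB : 1 < B) (hh : 1 ≤ h) :
    B ^ (Nat.digits B (h / B)).length ≤ h := by
  have h1 : B ^ (Nat.digits B h).length ≤ B * h := Nat.base_pow_length_digits_le B h hB (by omega)
  rw [len_digits_succ B h hB hh, pow_succ] at h1
  have hBpos : 0 < B := by omega
  calc B ^ (Nat.digits B (h / B)).length
      = B ^ (Nat.digits B (h / B)).length * B / B := by rw [Nat.mul_div_cancel _ hBpos]
    _ ≤ B * h / B := Nat.div_le_div_right h1
    _ = h := by rw [Nat.mul_div_cancel_left _ hBpos]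

lemma oddN_lt_pow (B h : ℕ) (hB : 1 < B) (hh : 1 ≤ h) :
    oddN B h < B ^ (2 * (Nat.digits B (h / B)).length + 1) := by
  have := Nat.ofDigits_lt_base_pow_length (b := B)
    (l := (Nat.digits B (h / B)).reverse ++ Nat.digits B h) hB
    (fun d hd => by
      rcases List.mem_append.mp hd with h1 | h1
      · exact Nat.digits_lt_base hB (List.mem_reverse.mp h1)
      · exact Nat.digits_lt_base hB h1)
  rw [List.length_append, List.length_reverse, len_digits_succ B h hB hh] at this
  rw [oddN]
  calc Nat.ofDigits B ((Nat.digits B (h / B)).reverse ++ Nat.digits B h)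
      < B ^ ((Nat.digits B (h / B)).length + ((Nat.digits B (h / B)).length + 1)) := this
    _ = B ^ (2 * (Nat.digits B (h / B)).length + 1) := by ring_nf

lemma oddN_mono (B : ℕ) (hB : 1 < B) {h1 h2 : ℕ} (hh : 1 ≤ h1) (h12 : h1 ≤ h2) :
    oddN B h1 ≤ oddN B h2 := by
  have hh2 : 1 ≤ h2 := le_trans hh h12
  set m1 := (Nat.digits B (h1 / B)).length with hm1
  set m2 := (Nat.digits B (h2 / B)).length with hm2
  have hm : m1 ≤ m2 := len_div_mono B hB (Nat.div_le_div_right h12)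
  rcases Nat.eq_or_lt_of_le hm with heq | hlt
  · -- same length: compare directly
    rw [oddN_split, oddN_split, ← hm1, ← hm2]
    have hr1 := rev_lt B hB (h1 / B)
    rw [← hm1] at hr1
    set r1 := Nat.ofDigits B (Nat.digits B (h1 / B)).reverse
    set r2 := Nat.ofDigits B (Nat.digits B (h2 / B)).reverse
    rcases Nat.eq_or_lt_of_le h12 with h' | h'
    · subst h'; rw [heq]
    · have hstep : h1 + 1 ≤ h2 := h'
      calc r1 + B ^ m1 * h1 ≤ B ^ m1 * h1 + B ^ m1 := by omega
        _ = B ^ m1 * (h1 + 1) := by ring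
        _ ≤ B ^ m1 * h2 := Nat.mul_le_mul_left _ hstep
        _ = B ^ m2 * h2 := by rw [heq]
        _ ≤ r2 + B ^ m2 * h2 := Nat.le_add_left _ _
  · have hlt1 : oddN B h1 < B ^ (2 * m1 + 1) := oddN_lt_pow B h1 hB hh
    have hge : B ^ (2 * m2) ≤ oddN B h2 := by
      rw [oddN_split, ← hm2]
      have hb2 : B ^ m2 ≤ h2 := base_pow_le B h2 hB hh2
      calc B ^ (2 * m2) = B ^ m2 * B ^ m2 := by ring
        _ ≤ B ^ m2 * h2 := Nat.mul_le_mul_left _ hb2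
        _ ≤ _ := Nat.le_add_left _ _
    have hpow : B ^ (2 * m1 + 1) ≤ B ^ (2 * m2) := Nat.pow_le_pow_right (by omega) (by omega)
    omega

lemma pal_complete (B p : ℕ) (hB : 1 < B) (hp : 1 ≤ p)
    (hpal : (Nat.digits B p).reverse = Nat.digits B p) :
    ∃ h : ℕ, 1 ≤ h ∧ (p = oddN B h ∨ p = evenN B h) := by
  set D := Nat.digits B p with hD
  have hDne : D ≠ [] := Nat.digits_ne_nil_iff_ne_zero.mpr (by omega)
  set L := D.length with hL
  have hLpos : 0 < L := List.length_pos_of_ne_nil hDne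
  set k := L / 2 with hk
  have hkL : k < L := Nat.div_lt_self hLpos (by omega)
  have hdropne : D.drop k ≠ [] := by
    intro hcon
    have := congrArg List.length hcon
    simp only [List.length_drop, List.length_nil] at this
    omega
  set h := Nat.ofDigits B (D.drop k) with hh
  have hdig : Nat.digits B h = D.drop k := by
    apply Nat.digits_ofDigits B hB
    · intro d hd
      exact Nat.digits_lt_base hB (List.mem_of_mem_drop hd)
    · intro hne2
      rw [List.getLast_drop hne2]
      exact Nat.getLast_digit_ne_zero B (by omega)
  have hpos : 1 ≤ h := by
    rcases Nat.eq_zero_or_pos h with h0 | h1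
    · exfalso
      rw [h0] at hdig
      exact hdropne (by simpa using hdig.symm)
    · exact h1
  have htake : ∀ n, n ≤ L → D.take n = (D.drop (L - n)).reverse := by
    intro n hn
    have := List.take_reverse (xs := D) (i := n)
    rw [hpal] at this
    exact this
  have hofD : p = Nat.ofDigits B D := (Nat.ofDigits_digits B p).symm
  by_cases hpar : L % 2 = 0
  · refine ⟨h, hpos, Or.inr ?_⟩
    have hsplit : D = (D.drop k).reverse ++ D.drop k := by
      conv_lhs => rw [← List.take_append_drop k D]
      congr 1
      have := htake k (by omega)
      rw [show L - k = k by omega] at this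
      exact this
    rw [evenN, hdig, ← hsplit, ← hofD]
  · refine ⟨h, hpos, Or.inl ?_⟩
    have hdiv : Nat.digits B (h / B) = D.drop (k+1) := by
      have hstep := Nat.digits_def' hB (show 0 < h by omega)
      rw [hdig] at hstep
      have ht := congrArg List.tail hstep
      rw [List.tail_drop] at ht
      simpa using ht.symm
    have hsplit : D = (D.drop (k+1)).reverse ++ D.drop k := by
      conv_lhs => rw [← List.take_append_drop k D]
      congr 1
      have := htake k (by omega)
      rw [show L - k = k + 1 by omega] at this
      exact this
    rw [oddN, hdig, hdiv, ← hsplit, ← hofD]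

lemma mirror_odd_eq (b h : Int) (hb : 2 ≤ b) (hh : 0 ≤ h) :
    mirror h (PySem.Int.floordiv h b) b = ((oddN b.toNat h.toNat : ℕ) : Int) := by
  have hbn : (0:Int) ≤ b := by omega
  have e2 : PySem.Int.floordiv h b = ((h.toNat / b.toNat : Nat) : Int) := by
    conv_lhs => rw [← Int.toNat_of_nonneg hh, ← Int.toNat_of_nonneg hbn]
    exact PySem.Int.floordiv_natCast _ _
  rw [mirror, e2, mirrorGo_eq b hb _ _ (by positivity) (le_refl _) h, Int.toNat_natCast,
    oddN_split]
  have hbcast : ((b.toNat : Int)) = b := Int.toNat_of_nonneg hbn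
  have hhcast : ((h.toNat : Int)) = h := Int.toNat_of_nonneg hh
  push_cast [hbcast, hhcast]
  ring

lemma mirror_even_eq (b h : Int) (hb : 2 ≤ b) (hh : 0 ≤ h) :
    mirror h h b = ((evenN b.toNat h.toNat : ℕ) : Int) := by
  have hbn : (0:Int) ≤ b := by omega
  rw [mirror, mirrorGo_eq b hb _ _ hh (le_refl _) h, evenN_split]
  have hbcast : ((b.toNat : Int)) = b := Int.toNat_of_nonneg hbn
  have hhcast : ((h.toNat : Int)) = h := Int.toNat_of_nonneg hh
  push_cast [hbcast, hhcast]
  ring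

-- every base-B palindrome arises as oddN or evenN of its top half
-- ===== the generation loop collects exactly the palindromes ≤ limit =====

lemma le_oddI (b j : Int) (hb : 2 ≤ b) (hj : 0 ≤ j) :
    j ≤ mirror j (PySem.Int.floordiv j b) b := by
  rw [mirror_odd_eq b j hb hj]
  have h := le_oddN b.toNat j.toNat (by omega)
  calc j = ((j.toNat : ℕ) : Int) := (Int.toNat_of_nonneg hj).symm
    _ ≤ _ := Nat.cast_le.mpr h

lemma oddI_mono (b : Int) (hb : 2 ≤ b) {j1 j2 : Int} (h1 : 1 ≤ j1) (h12 : j1 ≤ j2) :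
    mirror j1 (PySem.Int.floordiv j1 b) b ≤ mirror j2 (PySem.Int.floordiv j2 b) b := by
  rw [mirror_odd_eq b j1 hb (by omega), mirror_odd_eq b j2 hb (by omega)]
  exact Nat.cast_le.mpr (oddN_mono b.toNat (by omega) (by omega) (by omega))

lemma oddI_le_evenI (b j : Int) (hb : 2 ≤ b) (hj : 1 ≤ j) :
    mirror j (PySem.Int.floordiv j b) b ≤ mirror j j b := by
  rw [mirror_odd_eq b j hb (by omega), mirror_even_eq b j hb (by omega)]
  exact Nat.cast_le.mpr (oddN_le_evenN b.toNat j.toNat (by omega) (by omega))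

lemma mem_palGo (b limit : Int) (hb : 2 ≤ b) :
    ∀ (fuel : Nat) (h : Int), 1 ≤ h →
    limit < mirror (h + fuel) (PySem.Int.floordiv (h + fuel) b) b →
    ∀ (s : PySem.Set Int) (n : Int),
      (n ∈ palGo fuel h b limit s ↔ n ∈ s ∨ ∃ j : Int, h ≤ j ∧
        mirror j (PySem.Int.floordiv j b) b ≤ limit ∧
        (n = mirror j (PySem.Int.floordiv j b) b ∨
          (n = mirror j j b ∧ mirror j j b ≤ limit))) := by
  intro fuel
  induction fuel with
  | zero =>
      intro h hh hfuel s n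
      simp only [Nat.cast_zero, add_zero] at hfuel
      simp only [palGo]
      constructor
      · exact Or.inl
      · rintro (hn | ⟨j, hj1, hj2, _⟩)
        · exact hn
        · exact absurd hj2 (by have := oddI_mono b hb hh hj1; omega)
  | succ f ih =>
      intro h hh hfuel s n
      have hfuel' : limit < mirror ((h+1) + (f : ℕ))
          (PySem.Int.floordiv ((h+1) + (f : ℕ)) b) b := by
        have : (h + ((f+1 : ℕ) : Int)) = (h+1) + (f : ℕ) := by push_cast; ring
        rwa [this] at hfuel
      by_cases hcond : mirror h (PySem.Int.floordiv h b) b ≤ limit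
      · rw [show palGo (f+1) h b limit s
            = palGo f (h+1) b limit
                (if mirror h h b ≤ limit then
                  (s.add (mirror h (PySem.Int.floordiv h b) b)).add (mirror h h b)
                 else s.add (mirror h (PySem.Int.floordiv h b) b)) from by
          simp only [palGo, if_pos hcond]]
        rw [ih (h+1) (by omega) hfuel' _ n]
        have hmem : (n ∈ (if mirror h h b ≤ limit then
                  (s.add (mirror h (PySem.Int.floordiv h b) b)).add (mirror h h b)
                 else s.add (mirror h (PySem.Int.floordiv h b) b)))
            ↔ (n ∈ s ∨ n = mirror h (PySem.Int.floordiv h b) b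
                ∨ (n = mirror h h b ∧ mirror h h b ≤ limit)) := by
          by_cases he : mirror h h b ≤ limit
          · rw [if_pos he, PySem.Set.mem_add, PySem.Set.mem_add]
            tauto
          · rw [if_neg he, PySem.Set.mem_add]
            tauto
        rw [hmem]
        constructor
        · rintro ((hn | hn | ⟨hn, hne⟩) | ⟨j, hj1, hj2, hj3⟩)
          · exact Or.inl hn
          · exact Or.inr ⟨h, le_refl h, hcond, Or.inl hn⟩
          · exact Or.inr ⟨h, le_refl h, hcond, Or.inr ⟨hn, hne⟩⟩
          · exact Or.inr ⟨j, by omega, hj2, hj3⟩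
        · rintro (hn | ⟨j, hj1, hj2, hj3⟩)
          · exact Or.inl (Or.inl hn)
          · rcases eq_or_lt_of_le hj1 with hjh | hjh
            · subst hjh
              rcases hj3 with h3 | h3
              · exact Or.inl (Or.inr (Or.inl h3))
              · exact Or.inl (Or.inr (Or.inr h3))
            · exact Or.inr ⟨j, by omega, hj2, hj3⟩
      · rw [show palGo (f+1) h b limit s = s from by simp only [palGo, if_neg hcond]]
        constructor
        · exact Or.inl
        · rintro (hn | ⟨j, hj1, hj2, _⟩)
          · exact hn
          · exact absurd hj2 (by have := oddI_mono b hb hh hj1; omega)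

-- A's test, through the Nat digit list
lemma isPal_iff (p b : Int) (hb : 2 ≤ b) (hp : 1 ≤ p) :
    (isPalindromeBase p b = true)
      ↔ (Nat.digits b.toNat p.toNat).reverse = Nat.digits b.toNat p.toNat := by
  have htb : toBase p b = (Nat.digits b.toNat p.toNat).map (fun d : Nat => (d : Int)) := by
    unfold toBase
    rw [if_neg (by omega), toBaseGo_eq b hb p.toNat p (by omega) (le_refl _) []]
    rw [List.nil_append]
  unfold isPalindromeBase
  rw [decide_eq_true_iff, htb, ← List.map_reverse]
  constructor
  · intro h
    exact (List.map_injective_iff.mpr (fun x y hxy => Int.natCast_inj.mp hxy) h).symm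
  · intro h
    rw [h]

-- the key lemma: for 2 ≤ p ≤ limit, membership in the generated set is A's palindrome test
lemma pal_mem (b limit p : Int) (hb : 2 ≤ b) (hp : 2 ≤ p) (hpl : p ≤ limit) :
    PySem.Set.contains (palindromes b limit) p = isPalindromeBase p b := by
  have hBlt : 1 < b.toNat := by omega
  have hfuel : limit < mirror (1 + ((limit.toNat + 1 : ℕ) : Int))
      (PySem.Int.floordiv (1 + ((limit.toNat + 1 : ℕ) : Int)) b) b := by
    have h1 : (1 + ((limit.toNat + 1 : ℕ) : Int)) = limit + 2 := by push_cast; omega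
    rw [h1]
    have := le_oddI b (limit+2) hb (by omega)
    omega
  have hmem := mem_palGo b limit hb (limit.toNat + 1) 1 (le_refl 1) hfuel PySem.Set.empty p
  simp only [palindromes]
  have hiff := isPal_iff p b hb (by omega)
  by_cases hpal : isPalindromeBase p b = true
  case neg =>
    rw [Bool.not_eq_true] at hpal
    rw [hpal]
    by_cases hc : PySem.Set.contains (palGo (limit.toNat+1) 1 b limit PySem.Set.empty) p = true
    case neg =>
      rw [Bool.not_eq_true] at hc
      exact hc
    case pos =>
      exfalso
      rcases hmem.mp ((PySem.Set.contains_iff _ _).mp hc) with hn | ⟨j, hj1, hj2, hj3⟩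
      · simp [PySem.Set.empty] at hn
      · have htrue : isPalindromeBase p b = true := by
          rw [hiff]
          rcases hj3 with h3 | ⟨h3, _⟩
          · have hpe : p = ((oddN b.toNat j.toNat : ℕ) : Int) := by
              rw [h3, mirror_odd_eq b j hb (by omega)]
            have hpn : p.toNat = oddN b.toNat j.toNat := by
              rw [hpe, Int.toNat_natCast]
            rw [hpn]
            exact oddN_pal b.toNat j.toNat hBlt (by omega)
          · have hpe : p = ((evenN b.toNat j.toNat : ℕ) : Int) := by
              rw [h3, mirror_even_eq b j hb (by omega)]
            have hpn : p.toNat = evenN b.toNat j.toNat := by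
              rw [hpe, Int.toNat_natCast]
            rw [hpn]
            exact evenN_pal b.toNat j.toNat hBlt (by omega)
        rw [htrue] at hpal
        cases hpal
  case pos =>
    rw [hpal]
    apply (PySem.Set.contains_iff _ _).mpr
    apply hmem.mpr
    right
    obtain ⟨H, hH1, hcase⟩ := pal_complete b.toNat p.toNat hBlt (by omega) (hiff.mp hpal)
    have hoI : mirror (H : Int) (PySem.Int.floordiv (H : Int) b) b
        = ((oddN b.toNat H : ℕ) : Int) := by
      rw [mirror_odd_eq b _ hb (by positivity), Int.toNat_natCast]
    have heI : mirror (H : Int) (H : Int) b = ((evenN b.toNat H : ℕ) : Int) := by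
      rw [mirror_even_eq b _ hb (by positivity), Int.toNat_natCast]
    have hpcast : p = ((p.toNat : ℕ) : Int) := (Int.toNat_of_nonneg (by omega)).symm
    refine ⟨(H : Int), Nat.one_le_cast.mpr hH1, ?_⟩
    rcases hcase with hc | hc
    · have hpeq : p = ((oddN b.toNat H : ℕ) : Int) := by rw [hpcast, hc]
      exact ⟨by rw [hoI, ← hpeq]; exact hpl, Or.inl (by rw [hoI, ← hpeq])⟩
    · have hpeq : p = ((evenN b.toNat H : ℕ) : Int) := by rw [hpcast, hc]
      refine ⟨?_, Or.inr ⟨by rw [heI, ← hpeq], by rw [heI, ← hpeq]; exact hpl⟩⟩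
      have := oddI_le_evenI b (H : Int) hb (Nat.one_le_cast.mpr hH1)
      rw [heI, ← hpeq] at this
      omega

-- ===== the per-number pass =====

-- a fold of key-determined inserts, looked up away from / at an inserted key
lemma getD_fold_insert_not_mem (f : Int → PySem.Set Int) :
    ∀ (l : List Int) (d : PySem.Dict Int (PySem.Set Int)) (b : Int), b ∉ l →
      (l.foldl (fun d x => d.insert x (f x)) d).getD b PySem.Set.empty
        = d.getD b PySem.Set.empty := by
  intro l
  induction l with
  | nil => intro _d b _; rfl
  | cons x l ih =>
      intro d b hb
      simp only [List.mem_cons, not_or] at hb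
      simp only [List.foldl_cons]
      rw [ih _ b hb.2]
      simp [pysem, hb.1]

lemma getD_fold_insert_mem (f : Int → PySem.Set Int) :
    ∀ (l : List Int) (d : PySem.Dict Int (PySem.Set Int)) (b : Int), b ∈ l →
      (l.foldl (fun d x => d.insert x (f x)) d).getD b PySem.Set.empty = f b := by
  intro l
  induction l with
  | nil => intro _d b hb; simp at hb
  | cons x l ih =>
      intro d b hb
      simp only [List.foldl_cons]
      by_cases hmem : b ∈ l
      · exact ih _ b hmem
      · have hbx : b = x := by
          rcases List.mem_cons.mp hb with h | h
          · exact h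
          · exact absurd h hmem
        subst hbx
        rw [getD_fold_insert_not_mem f l _ b hmem]
        simp [pysem]

-- the dict {b: _palindromes(b, limit)} looked up at a key of the range
lemma getD_palsDict (limit : Int) (b : Int) (hb : b ∈ PySem.List.pyRange 2 17 1) :
    ((PySem.List.pyRange 2 17 1).foldl
        (fun d x => d.insert x (palindromes x limit)) PySem.Dict.empty).getD b PySem.Set.empty
      = palindromes b limit :=
  getD_fold_insert_mem (fun x => palindromes x limit) _ _ b hb

-- Counter[k] += 1 is dict[k] = dict.get(k, 0) + 1 (definitional)
lemma modify_eq_insert (d : PySem.Dict Int Int) (k : Int) :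
    d.modify k 0 (· + 1) = d.insert k (d.getD k 0 + 1) := rfl

-- inner loop over the bases: B's counter is the length of A's pal_bases, counts agree
lemma inner_eq (limit p : Int) (hp : 2 ≤ p) (hpl : p ≤ limit)
    (pals : PySem.Dict Int (PySem.Set Int))
    (hpals : ∀ b ∈ PySem.List.pyRange 2 17 1, pals.getD b PySem.Set.empty = palindromes b limit) :
    ∀ (l : List Int), (∀ b ∈ l, b ∈ PySem.List.pyRange 2 17 1) →
    ∀ (pb : List Int) (bc : PySem.Dict Int Int),
      l.foldl (innerStepB p pals) ((pb.length : Int), bc)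
        = (((l.foldl (innerStepA p) (pb, bc)).1.length : Int),
           (l.foldl (innerStepA p) (pb, bc)).2) := by
  intro l
  induction l with
  | nil => intro _ pb bc; rfl
  | cons b l ih =>
      intro hl pb bc
      have hbm : b ∈ PySem.List.pyRange 2 17 1 := hl b (by simp)
      have hb : 2 ≤ b := (PySem.List.mem_pyRange_one.mp hbm).1
      have hl' : ∀ x ∈ l, x ∈ PySem.List.pyRange 2 17 1 := fun x hx => hl x (List.mem_cons_of_mem _ hx)
      simp only [List.foldl_cons]
      have hcond : PySem.Set.contains (pals.getD b PySem.Set.empty) p = isPalindromeBase p b := by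
        rw [hpals b hbm]
        exact pal_mem b limit p hb hp hpl
      by_cases hc : isPalindromeBase p b
      · unfold innerStepB innerStepA
        rw [hcond, hc, if_pos rfl, if_pos rfl]
        have hlen : ((pb.length : Int) + 1) = (((pb ++ [b]).length : Int)) := by simp
        rw [hlen, modify_eq_insert]
        exact ih hl' (pb ++ [b]) _
      · unfold innerStepB innerStepA
        rw [hcond]
        simp only [hc, Bool.false_eq_true, if_false]
        exact ih hl' pb bc

-- the per-number steps agree on primes
lemma step_eq (limit : Int) (sF : List Int) (p : Int) (hp : 2 ≤ p) (hpl : p ≤ limit)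
    (pals : PySem.Dict Int (PySem.Set Int))
    (hpals : ∀ b ∈ PySem.List.pyRange 2 17 1, pals.getD b PySem.Set.empty = palindromes b limit)
    (st : Int × PySem.Dict Int Int × PySem.Dict Int Int)
    (hs : PySem.List.pyGetD (sF.map truthy) p false = true) :
    solveStepB (sF.map truthy) pals st p = solveStepA st p := by
  unfold solveStepB solveStepA
  rw [hs]
  simp only [Bool.not_true, Bool.false_eq_true, if_false]
  have hin := inner_eq limit p hp hpl pals hpals (PySem.List.pyRange 2 17 1) (fun _ h => h) [] st.2.1
  simp only [List.length_nil, Nat.cast_zero] at hin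
  rw [hin]
  set r := (PySem.List.pyRange 2 17 1).foldl (innerStepA p) ([], st.2.1) with hr
  dsimp only
  by_cases h2 : 2 ≤ r.1.length
  · rw [if_pos h2, if_pos (by exact_mod_cast h2 : (2:Int) ≤ (r.1.length : Int))]
    rw [modify_eq_insert]
  · rw [if_neg h2, if_neg (by
      intro hcon
      exact h2 (by exact_mod_cast hcon))]

-- B's guarded pass over the range is A's pass over the filtered prime list
lemma fold_filter_eq (limit : Int) (sF : List Int)
    (pals : PySem.Dict Int (PySem.Set Int))
    (hpals : ∀ b ∈ PySem.List.pyRange 2 17 1, pals.getD b PySem.Set.empty = palindromes b limit) :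
    ∀ (l : List Int), (∀ x ∈ l, 2 ≤ x ∧ x ≤ limit) →
    ∀ (init : Int × PySem.Dict Int Int × PySem.Dict Int Int),
      l.foldl (solveStepB (sF.map truthy) pals) init
        = (l.filter (fun i => decide (PySem.List.pyGetD sF i 0 ≠ 0))).foldl solveStepA init := by
  intro l
  induction l with
  | nil => intro _ _; rfl
  | cons x l ih =>
      intro hl init
      have hx2 : 2 ≤ x := (hl x (by simp)).1
      have hxl : x ≤ limit := (hl x (by simp)).2
      have hl' : ∀ y ∈ l, 2 ≤ y ∧ y ≤ limit := fun y hy => hl y (List.mem_cons_of_mem _ hy)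
      simp only [List.foldl_cons, List.filter_cons]
      by_cases hx : PySem.List.pyGetD sF x 0 ≠ 0
      · have hs : PySem.List.pyGetD (sF.map truthy) x false = true := by
          rw [pyGetD_map_truthy]
          simp [truthy, hx]
        rw [step_eq limit sF x hx2 hxl pals hpals init hs]
        have : (decide (PySem.List.pyGetD sF x 0 ≠ 0)) = true := by simp [hx]
        rw [this, if_pos rfl, List.foldl_cons]
        exact ih hl' _
      · have hs : PySem.List.pyGetD (sF.map truthy) x false = false := by
          rw [pyGetD_map_truthy]
          simp only [truthy]
          simpa using hx
        have hskip : solveStepB (sF.map truthy) pals init x = init := by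
          unfold solveStepB
          rw [hs]
          simp
        rw [hskip]
        have : (decide (PySem.List.pyGetD sF x 0 ≠ 0)) = false := by simpa using hx
        rw [this, if_neg (by simp)]
        exact ih hl' init

-- ===== VERDICT (by name: the statement is the Claim_ definition above) =====
theorem solve_spec : Claim_equal_solve := by
  intro N _hDom hPre
  unfold Spec_solve
  have hlim : 1 ≤ N - 1 := by
    unfold Pre_solve at hPre; omega
  show solve N = solve_alt N
  simp only [solve, solve_alt]
  rw [sieveA_eq (N-1), sieveB_final (N-1) hlim,
    fold_filter_eq (N-1) (sFoldA (N-1)) _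
      (fun b hb => getD_palsDict (N-1) b hb)
      (PySem.List.pyRange 2 (N-1+1) 1)
      (fun x hx => ⟨(PySem.List.mem_pyRange_one.mp hx).1,
        by have := (PySem.List.mem_pyRange_one.mp hx).2; omega⟩)
      (0, PySem.Dict.empty, PySem.Dict.empty)]
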